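-- pv_equiv track=rewrite | github.com/nermadie/CodeForces_Solutions | CodeforcesRound920Div3/prob04.py | solve
-- ===== SOURCE A (Python) =====
-- def solve(n, m, a, b):
--     a.sort()
--     b.sort(reverse=True)
--     temp_result = 0
--     for i in range(n):
--         temp_result += abs(a[i] - b[i])
--     result = temp_result
--     for i in range(n - 1, -1, -1):
--         temp_result = temp_result - abs(a[i] - b[i]) + abs(a[i] - b[m - (n - i)])
--         result = max(result, temp_result)
--
--     return result
-- ===== SOURCE B (Python) =====
-- def solve(n, m, a, b):
--     # Same in-place sorts as the original (a ascending, b descending).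
--     a.sort()
--     b.sort(reverse=True)
--     left = [abs(a[i] - b[i]) for i in range(n)]
--     right = [abs(a[i] - b[m - n + i]) for i in range(n)]
--     pref = [0]
--     for v in left:
--         pref.append(pref[-1] + v)
--     suff = [0]
--     for v in reversed(right):
--         suff.append(suff[-1] + v)
--     suff.reverse()
--     return max(p + s for p, s in zip(pref, suff))
-- ===== Notes on version B (the rewrite author's own statement) =====
-- stated objective: alternative
-- what changed: Replaces the running subtract/add accumulator with precomputed per-index cost tables, explicit prefix/suffix sum arrays and a max over all split points.
import Mathlib
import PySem

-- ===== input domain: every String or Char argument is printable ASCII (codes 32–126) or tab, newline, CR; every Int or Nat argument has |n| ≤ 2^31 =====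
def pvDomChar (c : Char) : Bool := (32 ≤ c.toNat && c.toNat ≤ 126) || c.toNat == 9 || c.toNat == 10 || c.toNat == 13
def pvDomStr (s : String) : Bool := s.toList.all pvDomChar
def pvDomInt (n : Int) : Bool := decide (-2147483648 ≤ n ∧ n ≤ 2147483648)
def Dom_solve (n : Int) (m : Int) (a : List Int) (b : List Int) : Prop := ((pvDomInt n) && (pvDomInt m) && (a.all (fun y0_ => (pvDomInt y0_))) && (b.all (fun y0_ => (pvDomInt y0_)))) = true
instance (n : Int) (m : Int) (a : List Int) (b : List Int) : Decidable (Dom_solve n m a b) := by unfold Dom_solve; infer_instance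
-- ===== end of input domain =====

-- B replaces A's running subtract/add accumulator by precomputed cost tables with prefix/suffix
-- sum arrays and a max over all split points; equivalence is about the return value (both Pythons
-- sort a and b in place the same way).

-- ===== PORT A =====
def solve (n : Int) (m : Int) (a : List Int) (b : List Int) : Int :=
  let sa := PySem.List.sorted a (fun x => x) false
  let sb := PySem.List.sorted b (fun x => x) true
  let temp := (PySem.List.pyRange 0 n 1).foldl
      (fun t i => t + |PySem.List.pyGetD sa i 0 - PySem.List.pyGetD sb i 0|) 0
  let st := (PySem.List.pyRange (n - 1) (-1) (-1)).foldl
      (fun (p : Int × Int) i =>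
        (p.1 - |PySem.List.pyGetD sa i 0 - PySem.List.pyGetD sb i 0|
             + |PySem.List.pyGetD sa i 0 - PySem.List.pyGetD sb (m - (n - i)) 0|,
         max p.2 (p.1 - |PySem.List.pyGetD sa i 0 - PySem.List.pyGetD sb i 0|
             + |PySem.List.pyGetD sa i 0 - PySem.List.pyGetD sb (m - (n - i)) 0|)))
      (temp, temp)
  st.2

-- ===== PORT B =====
def solve_alt (n : Int) (m : Int) (a : List Int) (b : List Int) : Int :=
  let sa := PySem.List.sorted a (fun x => x) false
  let sb := PySem.List.sorted b (fun x => x) true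
  let left := (PySem.List.pyRange 0 n 1).map
      (fun i => |PySem.List.pyGetD sa i 0 - PySem.List.pyGetD sb i 0|)
  let right := (PySem.List.pyRange 0 n 1).map
      (fun i => |PySem.List.pyGetD sa i 0 - PySem.List.pyGetD sb (m - n + i) 0|)
  let pref := left.foldl (fun ps v => ps ++ [PySem.List.pyGetD ps (-1) 0 + v]) [0]
  let suff := (right.reverse.foldl (fun ss v => ss ++ [PySem.List.pyGetD ss (-1) 0 + v]) [0]).reverse
  -- Python's max(...) raises only on an empty generator; pref starts as [0], so the zipped
  -- list is never empty and getD's default is unreachable.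
  ((PySem.List.max? ((pref.zip suff).map (fun p => p.1 + p.2)) (fun x => x)).getD 0)

-- ===== PRECONDITION & SPEC =====
-- Pre_solve holds exactly where the Python A returns: for n ≤ 0 both loops are empty, and for
-- 0 < n every index a[i], b[i], b[m-(n-i)] used must lie in Python's accepted range
-- [-len, len) — otherwise A raises IndexError (B raises on exactly the same inputs).
def Pre_solve (n : Int) (m : Int) (a : List Int) (b : List Int) : Prop :=
  n ≤ 0 ∨ (n ≤ (a.length : Int) ∧ n ≤ (b.length : Int) ∧
           -(b.length : Int) ≤ m - n ∧ m ≤ (b.length : Int))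
instance (n : Int) (m : Int) (a : List Int) (b : List Int) : Decidable (Pre_solve n m a b) := by
  unfold Pre_solve; infer_instance

def pvWitness_solve : Int × Int × List Int × List Int := (2, 3, [1, 2], [5, 1, 7])

def Spec_solve (n : Int) (m : Int) (a : List Int) (b : List Int) (out : Int) : Prop := out = solve_alt n m a b
instance (n : Int) (m : Int) (a : List Int) (b : List Int) (out : Int) : Decidable (Spec_solve n m a b out) := by unfold Spec_solve; infer_instance

-- ===== CLAIM (what is proved, stated in full; the proofs are below) =====
def Claim_equal_solve : Prop := ∀ (n : Int) (m : Int) (a : List Int) (b : List Int), Dom_solve n m a b → Pre_solve n m a b → Spec_solve n m a b (solve n m a b)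

-- ===== LEMMAS AND PROOFS =====

-- partial sums of a list starting from accumulator s (the values appended by B's scan loops)
def psums (s : Int) : List Int → List Int
  | [] => []
  | v :: vs => (s + v) :: psums (s + v) vs

-- the common specification both loops compute on the list of (left,right) cost pairs:
-- .1 = sum of the right costs, .2 = max over splits j of (sum left before j + sum right from j)
def specB : List (Int × Int) → Int × Int
  | [] => (0, 0)
  | (x, y) :: P => ((specB P).1 + y, max ((specB P).1 + y) ((specB P).2 + x))

-- B's candidate list: the value of each split, head = split 0, last = split n
def candB : List (Int × Int) → List Int
  | [] => [0]
  | (x, y) :: P => ((P.map Prod.snd).sum + y) :: (candB P).map (fun c => x + c)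

lemma candB_ne_nil (P : List (Int × Int)) : candB P ≠ [] := by
  cases P with
  | nil => simp [candB]
  | cons p P => cases p; simp [candB]

lemma specB_fst (P : List (Int × Int)) : (specB P).1 = (P.map Prod.snd).sum := by
  induction P with
  | nil => simp [specB]
  | cons q P ih => obtain ⟨x, y⟩ := q; simp [specB, ih, add_comm]

lemma sumFst_le_specB (P : List (Int × Int)) : (P.map Prod.fst).sum ≤ (specB P).2 := by
  induction P with
  | nil => simp [specB]
  | cons q P ih => obtain ⟨x, y⟩ := q; simp only [specB, List.map_cons, List.sum_cons]; omega

-- ----- A's countdown loop computes specB -----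
lemma loopA (P : List (Int × Int)) : ∀ (c : Int),
    P.reverse.foldl
      (fun (p : Int × Int) (q : Int × Int) =>
        (p.1 - q.1 + q.2, max p.2 (p.1 - q.1 + q.2)))
      ((P.map Prod.fst).sum + c, (P.map Prod.fst).sum + c)
    = ((P.map Prod.snd).sum + c,
       max ((P.map Prod.fst).sum + c) ((specB P).2 + c)) := by
  induction P with
  | nil => intro c; simp [specB]
  | cons q P ih =>
    intro c
    obtain ⟨x, y⟩ := q
    have hrw : (((x, y) :: P).map Prod.fst).sum + c = (P.map Prod.fst).sum + (x + c) := by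
      simp; ring
    rw [List.reverse_cons, List.foldl_append, hrw, ih (x + c)]
    have hs := specB_fst P
    simp only [List.foldl_cons, List.foldl_nil, specB, List.map_cons, List.sum_cons,
      Prod.mk.injEq]
    constructor <;> omega

-- ----- B's scan loop builds [s] ++ partial sums -----
lemma scanB (L : List Int) : ∀ (init : List Int) (s : Int),
    L.foldl (fun ps v => ps ++ [PySem.List.pyGetD ps (-1) 0 + v]) (init ++ [s])
      = init ++ s :: psums s L := by
  induction L with
  | nil => intro init s; simp [psums]
  | cons v vs ih =>
    intro init s
    simp only [List.foldl_cons, PySem.List.pyGetD_neg_one_append_singleton]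
    rw [ih (init ++ [s]) (s + v)]
    simp [psums]

lemma psums_shift (L : List Int) : ∀ (s t : Int),
    psums (s + t) L = (psums t L).map (fun c => s + c) := by
  induction L with
  | nil => intro s t; simp [psums]
  | cons v vs ih =>
    intro s t
    simp only [psums, List.map_cons]
    rw [show s + t + v = s + (t + v) by ring, ih s (t + v)]

lemma psums_append (u : List Int) : ∀ (w : List Int) (s : Int),
    psums s (u ++ w) = psums s u ++ psums (s + u.sum) w := by
  induction u with
  | nil => intro w s; simp [psums]
  | cons v vs ih =>
    intro w s
    simp only [List.cons_append, psums, List.sum_cons]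
    rw [ih w (s + v), show s + (v + vs.sum) = s + v + vs.sum by ring]

-- the suffix-sum list B builds for q :: P, unfolded one step
lemma suffList_cons (x y : Int) (P : List (Int × Int)) :
    (psums 0 ((((x, y) :: P).map Prod.snd).reverse)).reverse ++ [0]
      = ((P.map Prod.snd).sum + y) :: ((psums 0 ((P.map Prod.snd).reverse)).reverse ++ [0]) := by
  rw [List.map_cons, List.reverse_cons, psums_append (P.map Prod.snd).reverse [y] 0]
  simp [psums, List.sum_reverse, add_comm]

-- ----- B's candidate list equals candB -----
lemma combinedB (P : List (Int × Int)) :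
    (((0 : Int) :: psums 0 (P.map Prod.fst)).zip
        ((psums 0 ((P.map Prod.snd).reverse)).reverse ++ [0])).map (fun p => p.1 + p.2)
      = candB P := by
  induction P with
  | nil => simp [psums, candB]
  | cons q P ih =>
    obtain ⟨x, y⟩ := q
    rw [suffList_cons]
    have hfst : ((0 : Int) :: psums 0 (((x, y) :: P).map Prod.fst))
        = 0 :: (((0 : Int) :: psums 0 (P.map Prod.fst)).map (fun c => x + c)) := by
      simp only [List.map_cons, psums, List.map_cons]
      rw [show (0 : Int) + x = x + 0 by ring, psums_shift (P.map Prod.fst) x 0]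
    rw [hfst, List.zip_cons_cons, List.map_cons, List.zip_map_left, List.map_map]
    have hcomp : ((fun (p : Int × Int) => p.1 + p.2) ∘ Prod.map (fun c => x + c) id)
        = (fun c => x + c) ∘ (fun (p : Int × Int) => p.1 + p.2) := by
      funext p; cases p; simp [Prod.map]; ring
    rw [hcomp, ← List.map_map, ih]
    simp [candB]

-- ----- folding max over a (x + ·)-shifted list -----
lemma foldl_max_map_add (t : List Int) : ∀ (x yv a : Int),
    (t.map (fun c => x + c)).foldl max (max yv (x + a)) = max yv (x + t.foldl max a) := by
  induction t with
  | nil => intro x yv a; simp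
  | cons v vs ih =>
    intro x yv a
    simp only [List.map_cons, List.foldl_cons]
    rw [show max (max yv (x + a)) (x + v) = max yv (x + max a v) by omega, ih]

-- ----- max over candB equals specB -----
lemma maxCand (P : List (Int × Int)) : ∀ (h : Int) (t : List Int),
    candB P = h :: t → t.foldl max h = (specB P).2 := by
  induction P with
  | nil =>
    intro h t he
    simp only [candB, List.cons.injEq] at he
    rw [← he.1, ← he.2]
    simp [specB]
  | cons q P ih =>
    intro h t he
    obtain ⟨x, y⟩ := q
    obtain ⟨h', t', he'⟩ : ∃ h' t', candB P = h' :: t' := by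
      cases hc : candB P with
      | nil => exact absurd hc (candB_ne_nil P)
      | cons a b => exact ⟨a, b, rfl⟩
    rw [candB, he', List.map_cons] at he
    injection he with h1 h2
    rw [← h1, ← h2]
    simp only [List.foldl_cons]
    rw [foldl_max_map_add, ih h' t' he']
    have hs := specB_fst P
    simp only [specB]
    omega

-- ----- the two loop pipelines agree, for any cost functions f (left) and g (right) -----
lemma core_abs (f g : Int → Int) (n : Int) :
    ((PySem.List.pyRange (n - 1) (-1) (-1)).foldl
        (fun (p : Int × Int) i =>
          (p.1 - f i + g i, max p.2 (p.1 - f i + g i)))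
        ((PySem.List.pyRange 0 n 1).foldl (fun t i => t + f i) 0,
         (PySem.List.pyRange 0 n 1).foldl (fun t i => t + f i) 0)).2
    = Option.getD
        (PySem.List.max?
          (List.map (fun (p : Int × Int) => p.1 + p.2)
            (List.zip
              (List.foldl (fun ps v => ps ++ [PySem.List.pyGetD ps (-1) 0 + v]) [0]
                (List.map f (PySem.List.pyRange 0 n 1)))
              (List.reverse
                (List.foldl (fun ss v => ss ++ [PySem.List.pyGetD ss (-1) 0 + v]) [0]
                  (List.reverse (List.map g (PySem.List.pyRange 0 n 1)))))))
          (fun x => x))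
        0 := by
  set idx := PySem.List.pyRange 0 n 1 with hidx
  set P := idx.map (fun i => (f i, g i)) with hP
  have hL : idx.map f = P.map Prod.fst := by
    rw [hP, List.map_map]; rfl
  have hR : idx.map g = P.map Prod.snd := by
    rw [hP, List.map_map]; rfl
  -- A side
  have hrange : PySem.List.pyRange (n - 1) (-1) (-1) = idx.reverse := by
    rw [PySem.List.pyRange_neg_one_eq_reverse]
    norm_num [hidx]
  have htemp : idx.foldl (fun t i => t + f i) 0 = (P.map Prod.fst).sum := by
    rw [PySem.List.foldl_add idx f 0, hL]; ring
  have hAfold : (idx.reverse.foldl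
      (fun (p : Int × Int) i => (p.1 - f i + g i, max p.2 (p.1 - f i + g i)))
      ((P.map Prod.fst).sum, (P.map Prod.fst).sum))
      = (P.reverse.foldl
          (fun (p : Int × Int) (q : Int × Int) => (p.1 - q.1 + q.2, max p.2 (p.1 - q.1 + q.2)))
          ((P.map Prod.fst).sum, (P.map Prod.fst).sum)) := by
    rw [hP, ← List.map_reverse, List.foldl_map]
  rw [hrange, htemp, hAfold,
    show ((P.map Prod.fst).sum, (P.map Prod.fst).sum)
        = ((P.map Prod.fst).sum + 0, (P.map Prod.fst).sum + 0) by ring_nf,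
    loopA P 0]
  -- B side
  rw [hL, hR,
    show ([0] : List Int) = [] ++ [0] from rfl, scanB (P.map Prod.fst) [] 0,
    show (([] : List Int) ++ [0]) = [] ++ [0] from rfl, scanB ((P.map Prod.snd).reverse) [] 0]
  simp only [List.nil_append, List.reverse_cons]
  rw [show (psums 0 ((P.map Prod.snd).reverse)).reverse ++ [(0 : Int)]
        = (psums 0 ((P.map Prod.snd).reverse)).reverse ++ [0] from rfl]
  rw [combinedB P]
  obtain ⟨h, t, he⟩ : ∃ h t, candB P = h :: t := by
    cases hc : candB P with
    | nil => exact absurd hc (candB_ne_nil P)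
    | cons a b => exact ⟨a, b, rfl⟩
  rw [he, PySem.List.max?_id_cons, Option.getD_some, maxCand P h t he]
  have := sumFst_le_specB P
  omega

-- concrete instance of core_abs, shaped exactly as the zeta-reduced bodies of the two ports
lemma core_conc (n m : Int) (sa sb : List Int) :
    ((PySem.List.pyRange (n - 1) (-1) (-1)).foldl
        (fun (p : Int × Int) i =>
          (p.1 - |PySem.List.pyGetD sa i 0 - PySem.List.pyGetD sb i 0|
               + |PySem.List.pyGetD sa i 0 - PySem.List.pyGetD sb (m - (n - i)) 0|,
           max p.2 (p.1 - |PySem.List.pyGetD sa i 0 - PySem.List.pyGetD sb i 0|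
               + |PySem.List.pyGetD sa i 0 - PySem.List.pyGetD sb (m - (n - i)) 0|)))
        ((PySem.List.pyRange 0 n 1).foldl
          (fun t i => t + |PySem.List.pyGetD sa i 0 - PySem.List.pyGetD sb i 0|) 0,
         (PySem.List.pyRange 0 n 1).foldl
          (fun t i => t + |PySem.List.pyGetD sa i 0 - PySem.List.pyGetD sb i 0|) 0)).2
    = Option.getD
        (PySem.List.max?
          (List.map (fun (p : Int × Int) => p.1 + p.2)
            (List.zip
              (List.foldl (fun ps v => ps ++ [PySem.List.pyGetD ps (-1) 0 + v]) [0]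
                (List.map (fun i => |PySem.List.pyGetD sa i 0 - PySem.List.pyGetD sb i 0|)
                  (PySem.List.pyRange 0 n 1)))
              (List.reverse
                (List.foldl (fun ss v => ss ++ [PySem.List.pyGetD ss (-1) 0 + v]) [0]
                  (List.reverse
                    (List.map (fun i => |PySem.List.pyGetD sa i 0 - PySem.List.pyGetD sb (m - n + i) 0|)
                      (PySem.List.pyRange 0 n 1)))))))
          (fun x => x))
        0 := by
  have h := core_abs (fun i => |PySem.List.pyGetD sa i 0 - PySem.List.pyGetD sb i 0|)
      (fun i => |PySem.List.pyGetD sa i 0 - PySem.List.pyGetD sb (m - n + i) 0|) n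
  simp only [] at h
  have hb : (fun (p : Int × Int) i =>
        (p.1 - |PySem.List.pyGetD sa i 0 - PySem.List.pyGetD sb i 0|
             + |PySem.List.pyGetD sa i 0 - PySem.List.pyGetD sb (m - (n - i)) 0|,
         max p.2 (p.1 - |PySem.List.pyGetD sa i 0 - PySem.List.pyGetD sb i 0|
             + |PySem.List.pyGetD sa i 0 - PySem.List.pyGetD sb (m - (n - i)) 0|)))
      = (fun (p : Int × Int) i =>
        (p.1 - |PySem.List.pyGetD sa i 0 - PySem.List.pyGetD sb i 0|
             + |PySem.List.pyGetD sa i 0 - PySem.List.pyGetD sb (m - n + i) 0|,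
         max p.2 (p.1 - |PySem.List.pyGetD sa i 0 - PySem.List.pyGetD sb i 0|
             + |PySem.List.pyGetD sa i 0 - PySem.List.pyGetD sb (m - n + i) 0|))) := by
    funext p i
    rw [show m - (n - i) = m - n + i by ring]
  rw [hb]
  exact h

-- ===== VERDICT (by name: the statement is the Claim_ definition above) =====
theorem solve_spec : Claim_equal_solve := by
  intro n m a b _ _
  show solve n m a b = solve_alt n m a b
  simp only [solve, solve_alt]
  exact core_conc n m (PySem.List.sorted a (fun x => x) false)
    (PySem.List.sorted b (fun x => x) true)
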